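-- pv_equiv track=rewrite | github.com/NaokiMatsumoto/Python_algorithm | search/Palindrome.py | find
-- ===== SOURCE A (Python) =====
-- def find(str):
--     # mid_str : 与えられた文字列(str)の中心
--     mid_str = len(str) // 2
--     # palindroome_lenは返り値とする。
--     palindrome_len = len(str) * 2
--     # 与えられた文字列の真ん中から右に移動し、回文を作れるかチェック
--     for index in range(mid_str, len(str)):
--         is_palindrome = True
--         # check_indexは0～indexからstrの右端までの長さ
--         for check_index in range(len(str) - index):
--             if str[index - check_index] != str[index + check_index]:
--                 is_palindrome = False
--                 break
--         if is_palindrome: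
--             palindrome_len = min(palindrome_len, index * 2 + 1)
--     return palindrome_len
-- ===== SOURCE B (Python) =====
-- def find(str):
--     # B: one left-to-right DP pass maintaining the set of ALL palindromic suffix
--     # lengths of the processed prefix (classic incremental recurrence:
--     # new lengths = {l+2 : l old length, preceding char matches} + {1, 0});
--     # the answer is 2*n minus the largest odd palindromic suffix length.
--     n = len(str)
--     lens = [0]
--     for i in range(n):
--         c = str[i]
--         lens = [l + 2 for l in lens if l < i and str[i - 1 - l] == c] + [1, 0]
--     odds = [l for l in lens if l % 2 == 1]
--     return 2 * n - max(odds) if odds else 2 * n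
-- ===== Notes on version B (the rewrite author's own statement) =====
-- stated objective: alternative
-- what changed: B replaces A's per-center outward expansion scan with a single left-to-right dynamic-programming pass that incrementally maintains the set of all palindromic suffix lengths of the processed prefix (lens -> {l+2 : preceding char matches} + {1,0}), then returns 2*n minus the largest odd length in the final set.
import Mathlib
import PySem

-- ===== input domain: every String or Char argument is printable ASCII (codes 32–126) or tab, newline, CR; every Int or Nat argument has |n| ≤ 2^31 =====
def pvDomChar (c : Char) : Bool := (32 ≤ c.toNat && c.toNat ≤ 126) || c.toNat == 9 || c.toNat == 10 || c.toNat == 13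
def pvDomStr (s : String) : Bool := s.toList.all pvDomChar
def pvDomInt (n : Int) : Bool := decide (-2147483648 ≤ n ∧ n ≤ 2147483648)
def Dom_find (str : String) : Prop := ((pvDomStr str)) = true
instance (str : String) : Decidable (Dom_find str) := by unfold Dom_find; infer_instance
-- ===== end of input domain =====

-- B replaces A's per-center expansion scan by one left-to-right DP pass maintaining the set of
-- all palindromic suffix lengths of the processed prefix ("alternative"; same worst-case cost).

-- ===== PORT A =====
-- inner loop 'for check_index in range(len(str)-index)' with break; the indices
-- index-check_index and index+check_index are provably in range for the indices the
-- outer loop produces (index ≥ len//2), so getD's default is never used (no IndexError).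
def pvACheck (cs : List Char) (index : Nat) : Nat → Nat → Bool
  | 0, _ => true
  | Nat.succ m, ci =>
    if cs.getD (index - ci) ' ' ≠ cs.getD (index + ci) ' ' then false
    else pvACheck cs index m (ci + 1)

-- outer loop 'for index in range(mid_str, len(str))' with accumulator palindrome_len
def pvALoop (cs : List Char) : List Nat → Int → Int
  | [], acc => acc
  | i :: rest, acc =>
    pvALoop cs rest (if pvACheck cs i (cs.length - i) 0 then min acc ((i : Int) * 2 + 1) else acc)

def find (str : String) : Int :=
  let cs := str.toList
  let n := cs.length
  pvALoop cs (List.range' (n / 2) (n - n / 2)) ((n : Int) * 2)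

-- ===== PORT B =====
-- one iteration of the loop body: lens = [l+2 for l in lens if l < i and str[i-1-l] == c] + [1, 0];
-- the Python indices i and i-1-l are in range (0 ≤ i-1-l < i < n), so getD's default is never used.
def pvBStep (cs : List Char) (i : Nat) (lens : List Nat) : List Nat :=
  (lens.filter (fun l => l < i && (cs.getD (i - 1 - l) ' ' == cs.getD i ' '))).map (· + 2) ++ [1, 0]

-- 'for i in range(n): …' folding the loop body over range(i₀) starting from lens = [0]
def pvBLens (cs : List Char) (i : Nat) : List Nat :=
  (List.range i).foldl (fun lens j => pvBStep cs j lens) [0]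

def find_alt (str : String) : Int :=
  let cs := str.toList
  let n := cs.length
  let odds := (pvBLens cs n).filter (fun l => l % 2 == 1)
  match PySem.List.max? odds (fun l => l) with
  | some m => 2 * (n : Int) - (m : Int)
  | none => 2 * (n : Int)

-- ===== PRECONDITION & SPEC =====
def Spec_find (str : String) (out : Int) : Prop := out = find_alt str
instance (str : String) (out : Int) : Decidable (Spec_find str out) := by unfold Spec_find; infer_instance

-- ===== CLAIM (what is proved, stated in full; the proofs are below) =====
def Claim_equal_find : Prop := ∀ (str : String), Dom_find str → Spec_find str (find str)

-- ===== LEMMAS AND PROOFS =====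

-- "the prefix of cs of length i ends in a palindrome of length l" (mirror formulation)
def Pal (cs : List Char) (i l : Nat) : Prop :=
  l ≤ i ∧ ∀ k, k < l → cs.getD (i - l + k) ' ' = cs.getD (i - 1 - k) ' '

lemma pal_zero (cs : List Char) (i : Nat) : Pal cs i 0 := by
  exact ⟨Nat.zero_le _, fun k hk => absurd hk (by omega)⟩

lemma pal_one (cs : List Char) (i : Nat) (h : 1 ≤ i) : Pal cs i 1 := by
  refine ⟨h, fun k hk => ?_⟩
  have : k = 0 := by omega
  subst this
  simp

-- peeling the outer pair: palindromic suffixes of a prefix extended by one char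
lemma pal_succ_iff (cs : List Char) (i l : Nat) :
    Pal cs (i + 1) l ↔
      l = 0 ∨ l = 1 ∨
        (2 ≤ l ∧ l - 2 < i ∧ cs.getD (i - 1 - (l - 2)) ' ' = cs.getD i ' ' ∧ Pal cs i (l - 2)) := by
  unfold Pal
  constructor
  · rintro ⟨hle, hmir⟩
    rcases Nat.lt_or_ge l 2 with hl2 | hl2
    · interval_cases l
      · exact Or.inl rfl
      · exact Or.inr (Or.inl rfl)
    · refine Or.inr (Or.inr ⟨hl2, by omega, ?_, by omega, ?_⟩)
      · have h0 := hmir 0 (by omega)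
        have e1 : i - 1 - (l - 2) = i + 1 - l + 0 := by omega
        have e2 : i = i + 1 - 1 - 0 := by omega
        rw [e1, e2]; exact h0
      · intro k hk
        have h1 := hmir (k + 1) (by omega)
        have e1 : i - (l - 2) + k = i + 1 - l + (k + 1) := by omega
        have e2 : i - 1 - k = i + 1 - 1 - (k + 1) := by omega
        rw [e1, e2]; exact h1
  · rintro (rfl | rfl | ⟨h2, hlt, hc, hle2, hin⟩)
    · exact pal_zero cs (i + 1)
    · exact pal_one cs (i + 1) (by omega)
    · refine ⟨by omega, ?_⟩
      intro k hk
      rcases Nat.eq_zero_or_pos k with rfl | hk0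
      · have e1 : i + 1 - l + 0 = i - 1 - (l - 2) := by omega
        have e2 : i + 1 - 1 - 0 = i := by omega
        rw [e1, e2]; exact hc
      rcases Nat.lt_or_ge k (l - 1) with hkl | hkl
      · have h1 := hin (k - 1) (by omega)
        have e1 : i + 1 - l + k = i - (l - 2) + (k - 1) := by omega
        have e2 : i + 1 - 1 - k = i - 1 - (k - 1) := by omega
        rw [e1, e2]; exact h1
      · have hk1 : k = l - 1 := by omega
        subst hk1
        have e1 : i + 1 - l + (l - 1) = i := by omega
        have e2 : i + 1 - 1 - (l - 1) = i - 1 - (l - 2) := by omega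
        rw [e1, e2]; exact hc.symm

lemma lens_mem (cs : List Char) (i : Nat) (l : Nat) :
    l ∈ pvBLens cs i ↔ Pal cs i l := by
  induction i generalizing l with
  | zero =>
    simp only [pvBLens, List.range_zero, List.foldl_nil, List.mem_singleton]
    constructor
    · rintro rfl; exact pal_zero cs 0
    · rintro ⟨hle, _⟩; omega
  | succ i ih =>
    have hstep : pvBLens cs (i + 1) = pvBStep cs i (pvBLens cs i) := by
      simp [pvBLens, List.range_succ]
    rw [hstep, pal_succ_iff]
    simp only [pvBStep, List.mem_append, List.mem_map, List.mem_filter,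
      Bool.and_eq_true, decide_eq_true_eq, beq_iff_eq, List.mem_cons,
      List.not_mem_nil, or_false]
    constructor
    · rintro (⟨l0, ⟨hl0, hlt, hc⟩, rfl⟩ | rfl | rfl)
      · refine Or.inr (Or.inr ⟨by omega, ?_, ?_, ?_⟩)
        · omega
        · have e : l0 + 2 - 2 = l0 := by omega
          rw [e]; exact hc
        · have e : l0 + 2 - 2 = l0 := by omega
          rw [e]; exact (ih l0).mp hl0
      · exact Or.inr (Or.inl rfl)
      · exact Or.inl rfl
    · rintro (rfl | rfl | ⟨h2, hlt, hc, hpal⟩)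
      · exact Or.inr (Or.inr rfl)
      · exact Or.inr (Or.inl rfl)
      · refine Or.inl ⟨l - 2, ⟨(ih (l - 2)).mpr hpal, hlt, hc⟩, by omega⟩

-- A's inner check is the pointwise mirror condition around the center
lemma aCheck_iff (cs : List Char) (i : Nat) :
    ∀ m c, pvACheck cs i m c = true ↔
      ∀ k, k < m → cs.getD (i - (c + k)) ' ' = cs.getD (i + (c + k)) ' ' := by
  intro m
  induction m with
  | zero => intro c; simp [pvACheck]
  | succ m ih =>
    intro c
    simp only [pvACheck]
    by_cases h : cs.getD (i - c) ' ' = cs.getD (i + c) ' '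
    · simp only [h, ne_eq, not_true_eq_false, if_false, ih]
      constructor
      · intro hall k hk
        rcases Nat.eq_zero_or_pos k with rfl | hk0
        · simpa using h
        · have := hall (k - 1) (by omega)
          have hck : c + 1 + (k - 1) = c + k := by omega
          simpa [hck] using this
      · intro hall k hk
        have := hall (k + 1) (by omega)
        have hck : c + (k + 1) = c + 1 + k := by omega
        simpa [hck] using this
    · simp only [h, ne_eq, not_false_eq_true, if_true]
      constructor
      · intro hf; exact absurd hf (by simp)
      · intro hall
        exact absurd (by simpa using hall 0 (by omega)) h

lemma check_iff_pal (cs : List Char) (n i : Nat) (hn : n = cs.length)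
    (hmid : n ≤ 2 * i + 1) (hi : i < n) :
    pvACheck cs i (n - i) 0 = true ↔ Pal cs n (2 * (n - i) - 1) := by
  rw [aCheck_iff]
  unfold Pal
  constructor
  · intro h
    refine ⟨by omega, ?_⟩
    intro k hk
    rcases Nat.lt_or_ge (n - 1 - k) i with hb | hb
    · -- right position below the center: use the mirrored pair kp = i - (n-1-k)
      obtain ⟨kp, hkp⟩ : ∃ kp, kp = i - (n - 1 - k) := ⟨_, rfl⟩
      have h1 := h kp (by omega)
      have e1 : n - (2 * (n - i) - 1) + k = i + (0 + kp) := by omega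
      have e2 : n - 1 - k = i - (0 + kp) := by omega
      rw [e1, e2]
      exact h1.symm
    · obtain ⟨kp, hkp⟩ : ∃ kp, kp = n - 1 - k - i := ⟨_, rfl⟩
      have h1 := h kp (by omega)
      have e1 : n - (2 * (n - i) - 1) + k = i - (0 + kp) := by omega
      have e2 : n - 1 - k = i + (0 + kp) := by omega
      rw [e1, e2]
      exact h1
  · rintro ⟨_, h⟩ k hk
    obtain ⟨kp, hkp⟩ : ∃ kp, kp = n - 1 - i - k := ⟨_, rfl⟩
    have h1 := h kp (by omega)
    have e1 : i - (0 + k) = n - (2 * (n - i) - 1) + kp := by omega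
    have e2 : i + (0 + k) = n - 1 - kp := by omega
    rw [e1, e2]
    exact h1

lemma aLoop_le_acc (cs : List Char) :
    ∀ (L : List Nat) (acc : Int), pvALoop cs L acc ≤ acc := by
  intro L
  induction L with
  | nil => intro acc; simp [pvALoop]
  | cons i rest ih =>
    intro acc
    simp only [pvALoop]
    split_ifs with h
    · exact le_trans (ih _) (min_le_left _ _)
    · exact ih acc

lemma aLoop_le (cs : List Char) :
    ∀ (L : List Nat) (acc : Int) (i : Nat), i ∈ L →
      pvACheck cs i (cs.length - i) 0 = true → pvALoop cs L acc ≤ (i : Int) * 2 + 1 := by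
  intro L
  induction L with
  | nil => intro acc i hi; exact absurd hi (List.not_mem_nil)
  | cons j rest ih =>
    intro acc i hi hchk
    rcases List.mem_cons.mp hi with rfl | hi'
    · simp only [pvALoop, hchk, if_true]
      exact le_trans (aLoop_le_acc cs rest _) (min_le_right _ _)
    · simp only [pvALoop]
      split_ifs with h
      · exact ih _ i hi' hchk
      · exact ih _ i hi' hchk

lemma aLoop_cases (cs : List Char) :
    ∀ (L : List Nat) (acc : Int), pvALoop cs L acc = acc ∨
      ∃ i ∈ L, pvACheck cs i (cs.length - i) 0 = true ∧ pvALoop cs L acc = (i : Int) * 2 + 1 := by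
  intro L
  induction L with
  | nil => intro acc; exact Or.inl rfl
  | cons j rest ih =>
    intro acc
    simp only [pvALoop]
    split_ifs with h
    · rcases ih (min acc ((j : Int) * 2 + 1)) with heq | ⟨i, hi, hchk, heq⟩
      · rcases le_total acc ((j : Int) * 2 + 1) with hle | hge
        · exact Or.inl (by rw [heq, min_eq_left hle])
        · exact Or.inr ⟨j, List.mem_cons_self .., h, by rw [heq, min_eq_right hge]⟩
      · exact Or.inr ⟨i, List.mem_cons_of_mem j hi, hchk, heq⟩
    · rcases ih acc with heq | ⟨i, hi, hchk, heq⟩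
      · exact Or.inl heq
      · exact Or.inr ⟨i, List.mem_cons_of_mem j hi, hchk, heq⟩

-- ===== VERDICT (by name: the statement is the Claim_ definition above) =====
theorem find_spec : Claim_equal_find := by
  intro str _
  unfold Spec_find find find_alt
  dsimp only
  rcases Nat.eq_zero_or_pos str.toList.length with h0 | hpos
  · rw [h0]
    simp [pvALoop, pvBLens, pvBStep, PySem.List.max?]
  · set cs := str.toList with hcs
    set n := cs.length with hn
    have hmem : ∀ l, l ∈ (pvBLens cs n).filter (fun l => l % 2 == 1) ↔ Pal cs n l ∧ l % 2 = 1 := by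
      intro l
      simp [List.mem_filter, lens_mem]
    have h1 : 1 ∈ (pvBLens cs n).filter (fun l => l % 2 == 1) :=
      (hmem 1).mpr ⟨pal_one cs n hpos, rfl⟩
    obtain ⟨m, hm⟩ : ∃ m, PySem.List.max? ((pvBLens cs n).filter (fun l => l % 2 == 1)) (fun l => l) = some m := by
      rcases hq : PySem.List.max? ((pvBLens cs n).filter (fun l => l % 2 == 1)) (fun l => l) with _ | m
      · rw [PySem.List.max?_eq_none_iff] at hq
        rw [hq] at h1
        exact absurd h1 (List.not_mem_nil)
      · exact ⟨m, rfl⟩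
    rw [hm]
    have hPal := (hmem m).mp (PySem.List.max?_mem hm)
    obtain ⟨hPm, hmodd⟩ := hPal
    have hmlen : m ≤ n := hPm.1
    have hmax : ∀ y ∈ (pvBLens cs n).filter (fun l => l % 2 == 1), y ≤ m := by
      intro y hy
      exact PySem.List.max?_isMax hm y hy
    -- upper bound: the center n - m/2 - 1 is scanned and its check succeeds
    have hub : pvALoop cs (List.range' (n / 2) (n - n / 2)) ((n : Int) * 2) ≤ 2 * (n : Int) - (m : Int) := by
      have hmemi : (n - m / 2 - 1) ∈ List.range' (n / 2) (n - n / 2) := by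
        rw [List.mem_range'_1]
        omega
      have hchk : pvACheck cs (n - m / 2 - 1) (cs.length - (n - m / 2 - 1)) 0 = true := by
        rw [← hn]
        rw [check_iff_pal cs n (n - m / 2 - 1) hn (by omega) (by omega)]
        have e : 2 * (n - (n - m / 2 - 1)) - 1 = m := by omega
        rw [e]; exact hPm
      have := aLoop_le cs (List.range' (n / 2) (n - n / 2)) ((n : Int) * 2) (n - m / 2 - 1) hmemi hchk
      have e : ((n - m / 2 - 1 : Nat) : Int) * 2 + 1 = 2 * (n : Int) - (m : Int) := by omega
      rw [e] at this
      exact this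
    -- lower bound: every scanned valid center corresponds to an odd palindromic suffix ≤ m
    have hlb : 2 * (n : Int) - (m : Int) ≤ pvALoop cs (List.range' (n / 2) (n - n / 2)) ((n : Int) * 2) := by
      rcases aLoop_cases cs (List.range' (n / 2) (n - n / 2)) ((n : Int) * 2) with heq | ⟨j, hj, hchk, heq⟩
      · rw [heq]; omega
      · rw [List.mem_range'_1] at hj
        rw [← hn] at hchk
        have hPj : Pal cs n (2 * (n - j) - 1) :=
          (check_iff_pal cs n j hn (by omega) (by omega)).mp hchk
        have hjodds : (2 * (n - j) - 1) ∈ (pvBLens cs n).filter (fun l => l % 2 == 1) :=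
          (hmem _).mpr ⟨hPj, by omega⟩
        have hjm := hmax _ hjodds
        rw [heq]
        omega
    exact le_antisymm hub hlb
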